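-- pv_equiv track=rewrite | github.com/pypi-data/pypi-mirror-379 | packages/mockylla/mockylla-0.5.0.tar.gz/mockylla-0.5.0/mockylla/parser/create.py | _parse_primary_key
-- ===== SOURCE A (Python) =====
-- def _split_top_level(value):
--     """Split a comma separated string while respecting nested parentheses."""
--
--     parts = []
--     current = ""
--     depth = 0
--
--     for char in value:
--         if char == "(":
--             depth += 1
--         elif char == ")":
--             depth -= 1
--         elif char == "," and depth == 0:
--             parts.append(current.strip())
--             current = ""
--             continue
--         current += char
--
--     parts.append(current.strip())
--     return [part for part in parts if part]
--
-- def _parse_primary_key(pk_definition):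
--     """Parse PRIMARY KEY definition into partition and clustering components."""
--
--     inner = pk_definition.strip()
--     if inner.startswith("(") and inner.endswith(")"):
--         inner = inner[1:-1].strip()
--
--     components = _split_top_level(inner)
--     if not components:
--         return [], []
--
--     first = components[0]
--     if first.startswith("(") and first.endswith(")"):
--         partition = [
--             part.strip()
--             for part in _split_top_level(first[1:-1].strip())
--             if part.strip()
--         ]
--     else:
--         partition = [first.strip()]
--
--     clustering = [comp.strip() for comp in components[1:]]
--     return partition, clustering
-- ===== SOURCE B (Python) =====
-- def _split_segments(value):
--     """Top-level comma split by repeated cut-finding: scan ahead to the next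
--     top-level comma, emit the slice, resume after it."""
--     parts = []
--     n = len(value)
--     start = 0
--     while True:
--         j = start
--         depth = 0
--         while j < n:
--             c = value[j]
--             if c == "(":
--                 depth += 1
--             elif c == ")":
--                 depth -= 1
--             elif c == "," and depth == 0:
--                 break
--             j += 1
--         parts.append(value[start:j].strip())
--         if j == n:
--             break
--         start = j + 1
--     return [p for p in parts if p]
--
--
-- def _parse_primary_key(pk_definition):
--     inner = pk_definition.strip()
--     if inner.startswith("(") and inner.endswith(")"):
--         inner = inner[1:-1].strip()
--     components = _split_segments(inner)
--     if not components:
--         return [], []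
--     first = components[0]
--     if first.startswith("(") and first.endswith(")"):
--         return _split_segments(first[1:-1].strip()), components[1:]
--     return [first], components[1:]
-- ===== Notes on version B (the rewrite author's own statement) =====
-- stated objective: alternative
-- what changed: Replaces the single character-fold with a (parts, current, depth) accumulator (run twice via a helper) by a cut-finding scanner that repeatedly locates the next top-level comma and emits the slice before it, with no string accumulator.
import Mathlib
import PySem

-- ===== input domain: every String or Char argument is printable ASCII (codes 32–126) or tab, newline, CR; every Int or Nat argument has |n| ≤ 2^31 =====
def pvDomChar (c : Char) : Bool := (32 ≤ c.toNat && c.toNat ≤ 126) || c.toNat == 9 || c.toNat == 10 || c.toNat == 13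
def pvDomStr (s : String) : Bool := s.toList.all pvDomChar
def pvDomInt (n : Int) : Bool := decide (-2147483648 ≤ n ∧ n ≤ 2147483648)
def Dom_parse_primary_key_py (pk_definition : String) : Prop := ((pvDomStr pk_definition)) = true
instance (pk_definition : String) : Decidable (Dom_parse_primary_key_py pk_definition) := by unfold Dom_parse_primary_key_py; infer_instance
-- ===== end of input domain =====

-- B replaces A's character-fold with a (parts, current, depth) accumulator by a cut-finding
-- scanner that repeatedly locates the next top-level comma and emits the slice before it
-- (objective: alternative decomposition, same asymptotic cost).

-- ===== PORT A =====
-- loop body of _split_top_level (state: parts, current, depth)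
def stepA (s : List (List Char) × List Char × Int) (c : Char) : List (List Char) × List Char × Int :=
  if c = '(' then (s.1, s.2.1 ++ [c], s.2.2 + 1)
  else if c = ')' then (s.1, s.2.1 ++ [c], s.2.2 - 1)
  else if c = ',' ∧ s.2.2 = 0 then (s.1 ++ [PySem.Chars.strip s.2.1], ([] : List Char), s.2.2)
  else (s.1, s.2.1 ++ [c], s.2.2)

-- _split_top_level: fold over the characters with state (parts, current, depth)
def splitTopA (value : List Char) : List (List Char) :=
  let st := value.foldl stepA ([], [], 0)
  (st.1 ++ [PySem.Chars.strip st.2.1]).filter (fun p => p ≠ [])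

def parse_primary_key_py (pk_definition : String) : List String × List String :=
  let inner0 := PySem.Chars.strip pk_definition.toList
  let inner := if PySem.Chars.startswith inner0 ['('] && PySem.Chars.endswith inner0 [')']
    then PySem.Chars.strip (PySem.List.slice inner0 (some 1) (some (-1))) else inner0
  match splitTopA inner with
  | [] => ([], [])
  | first :: rest =>
    let partition :=
      if PySem.Chars.startswith first ['('] && PySem.Chars.endswith first [')'] then
        (((splitTopA (PySem.Chars.strip (PySem.List.slice first (some 1) (some (-1))))).filter
            (fun p => PySem.Chars.strip p ≠ [])).map PySem.Chars.strip)
      else [PySem.Chars.strip first]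
    let clustering := rest.map PySem.Chars.strip
    (partition.map (fun l => String.ofList l), clustering.map (fun l => String.ofList l))

-- ===== PORT B =====
-- inner while loop of _split_segments: scan to the next top-level comma,
-- returning the segment before it and (if a comma was hit) the remainder
def findCutB : List Char → Int → List Char × Option (List Char)
  | [], _ => ([], none)
  | c :: cs, depth =>
    if c = '(' then let r := findCutB cs (depth + 1); (c :: r.1, r.2)
    else if c = ')' then let r := findCutB cs (depth - 1); (c :: r.1, r.2)
    else if c = ',' ∧ depth = 0 then ([], some cs)
    else let r := findCutB cs depth; (c :: r.1, r.2)

-- termination of the outer while loop: the remainder after a cut is shorter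
theorem findCutB_rest_lt : ∀ (cs : List Char) (d : Int) (seg r : List Char),
    findCutB cs d = (seg, some r) → r.length < cs.length := by
  intro cs
  induction cs with
  | nil => intro d seg r h; simp [findCutB] at h
  | cons c cs ih =>
    intro d seg r h
    simp only [findCutB] at h
    split_ifs at h with h1 h2 h3
    · obtain ⟨_, h2'⟩ := Prod.mk.injEq .. ▸ h
      have := ih (d + 1) (findCutB cs (d + 1)).1 r (by
        cases hx : findCutB cs (d + 1) with
        | mk a b => simp [hx] at h2' ⊢; simpa [hx] using h2' ▸ rfl)
      simpa using Nat.lt_succ_of_lt this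
    · obtain ⟨_, h2'⟩ := Prod.mk.injEq .. ▸ h
      have := ih (d - 1) (findCutB cs (d - 1)).1 r (by
        cases hx : findCutB cs (d - 1) with
        | mk a b => simp [hx] at h2' ⊢; simpa [hx] using h2' ▸ rfl)
      simpa using Nat.lt_succ_of_lt this
    · cases h; simp
    · obtain ⟨_, h2'⟩ := Prod.mk.injEq .. ▸ h
      have := ih d (findCutB cs d).1 r (by
        cases hx : findCutB cs d with
        | mk a b => simp [hx] at h2' ⊢; simpa [hx] using h2' ▸ rfl)
      simpa using Nat.lt_succ_of_lt this

-- outer while loop of _split_segments: emit the stripped segment, resume after the comma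
def segsB (cs : List Char) : List (List Char) :=
  match h : findCutB cs 0 with
  | (seg, none) => [PySem.Chars.strip seg]
  | (seg, some r) => PySem.Chars.strip seg :: segsB r
termination_by cs.length
decreasing_by exact findCutB_rest_lt cs 0 seg r h

def splitSegsB (cs : List Char) : List (List Char) :=
  (segsB cs).filter (fun p => p ≠ [])

def parse_primary_key_py_alt (pk_definition : String) : List String × List String :=
  let inner0 := PySem.Chars.strip pk_definition.toList
  let inner := if PySem.Chars.startswith inner0 ['('] && PySem.Chars.endswith inner0 [')']
    then PySem.Chars.strip (PySem.List.slice inner0 (some 1) (some (-1))) else inner0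
  match splitSegsB inner with
  | [] => ([], [])
  | first :: rest =>
    if PySem.Chars.startswith first ['('] && PySem.Chars.endswith first [')'] then
      ((splitSegsB (PySem.Chars.strip (PySem.List.slice first (some 1) (some (-1))))).map
          (fun l => String.ofList l),
        rest.map (fun l => String.ofList l))
    else ([String.ofList first], rest.map (fun l => String.ofList l))

-- ===== PRECONDITION & SPEC =====
def Spec_parse_primary_key_py (pk_definition : String) (out : List String × List String) : Prop := out = parse_primary_key_py_alt pk_definition
instance (pk_definition : String) (out : List String × List String) : Decidable (Spec_parse_primary_key_py pk_definition out) := by unfold Spec_parse_primary_key_py; infer_instance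

-- ===== CLAIM (what is proved, stated in full; the proofs are below) =====
def Claim_equal_parse_primary_key_py : Prop := ∀ (pk_definition : String), Dom_parse_primary_key_py pk_definition → Spec_parse_primary_key_py pk_definition (parse_primary_key_py pk_definition)

-- ===== LEMMAS AND PROOFS =====

theorem dropWhile_head_false {p : Char → Bool} (l : List Char) (c : Char)
    (h : (l.dropWhile p).head? = some c) : p c = false := by
  induction l with
  | nil => simp at h
  | cons a l ih =>
    by_cases ha : p a
    · exact ih (by simpa [List.dropWhile_cons, ha] using h)
    · simp [List.dropWhile_cons, ha] at h
      simpa [h] using ha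

theorem dropWhile_of_head {p : Char → Bool} (l : List Char)
    (h : ∀ c, l.head? = some c → p c = false) : l.dropWhile p = l := by
  cases l with
  | nil => simp
  | cons a l => simp [List.dropWhile_cons, h a rfl]

theorem dropWhile_idem {p : Char → Bool} (l : List Char) :
    (l.dropWhile p).dropWhile p = l.dropWhile p :=
  dropWhile_of_head _ (fun c hc => dropWhile_head_false l c hc)

theorem lstrip_rstrip {l : List Char} (h : PySem.Chars.lstrip l = l) :
    PySem.Chars.lstrip (PySem.Chars.rstrip l) = PySem.Chars.rstrip l := by
  unfold PySem.Chars.rstrip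
  unfold PySem.Chars.lstrip at h ⊢
  apply dropWhile_of_head
  intro c hc
  have hpre : (l.reverse.dropWhile PySem.Chars.isspace).reverse <+: l := by
    have := List.dropWhile_suffix (l := l.reverse) (p := PySem.Chars.isspace)
    simpa using this.reverse
  obtain ⟨t, ht⟩ := hpre
  cases hrev : (l.reverse.dropWhile PySem.Chars.isspace).reverse with
  | nil => simp [hrev] at hc
  | cons a u =>
    rw [hrev] at hc ht
    have hac : a = c := by simpa using hc
    subst hac
    rw [← ht] at h
    by_cases hp : PySem.Chars.isspace a
    · exfalso
      rw [List.cons_append, List.dropWhile_cons_of_pos hp] at h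
      have h1 := congrArg List.length h
      simp only [List.length_cons, List.length_append] at h1
      have h2 := List.length_dropWhile_le (p := PySem.Chars.isspace) (l := u ++ t)
      simp only [List.length_append] at h2
      omega
    · simpa using hp

theorem rstrip_idem (l : List Char) :
    PySem.Chars.rstrip (PySem.Chars.rstrip l) = PySem.Chars.rstrip l := by
  unfold PySem.Chars.rstrip
  rw [List.reverse_reverse, dropWhile_idem]

theorem strip_idem (s : List Char) :
    PySem.Chars.strip (PySem.Chars.strip s) = PySem.Chars.strip s := by
  unfold PySem.Chars.strip
  rw [lstrip_rstrip (l := PySem.Chars.lstrip s) (dropWhile_idem s), rstrip_idem]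

-- bridge: A's fold, started from (parts, current, d), produces parts ++ the segments that
-- B's cut-finder yields from cs at depth d with `current` glued onto the first segment
def segsFrom (cur cs : List Char) (d : Int) : List (List Char) :=
  match findCutB cs d with
  | (seg, none) => [PySem.Chars.strip (cur ++ seg)]
  | (seg, some r) => PySem.Chars.strip (cur ++ seg) :: segsB r

theorem segsB_unfold (cs : List Char) : segsB cs = segsFrom [] cs 0 := by
  rw [segsB]
  unfold segsFrom
  rcases hx : findCutB cs 0 with ⟨seg, _ | r⟩ <;> simp [hx]

theorem foldA_eq : ∀ (cs : List Char) (parts : List (List Char)) (cur : List Char) (d : Int),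
    (cs.foldl stepA (parts, cur, d)).1 ++ [PySem.Chars.strip (cs.foldl stepA (parts, cur, d)).2.1]
      = parts ++ segsFrom cur cs d := by
  intro cs
  induction cs with
  | nil => intro parts cur d; simp [segsFrom, findCutB]
  | cons c cs ih =>
    intro parts cur d
    by_cases h1 : c = '('
    · subst h1
      simp only [List.foldl_cons, stepA, if_pos rfl]
      rw [ih]
      congr 1
      unfold segsFrom
      simp only [findCutB, if_pos rfl]
      rcases hx : findCutB cs (d + 1) with ⟨seg, _ | r⟩ <;> simp [hx]
    · by_cases h2 : c = ')'
      · subst h2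
        simp only [List.foldl_cons, stepA, if_neg h1, if_pos rfl]
        rw [ih]
        congr 1
        unfold segsFrom
        simp only [findCutB, if_neg h1, if_pos rfl]
        rcases hx : findCutB cs (d - 1) with ⟨seg, _ | r⟩ <;> simp [hx]
      · by_cases h3 : c = ',' ∧ d = 0
        · obtain ⟨rfl, rfl⟩ := h3
          simp only [List.foldl_cons, stepA, if_neg h1, if_neg h2, eq_self_iff_true, and_self, if_true]
          rw [ih]
          rw [← segsB_unfold]
          unfold segsFrom
          simp only [findCutB, if_neg h1, if_neg h2, eq_self_iff_true, and_self, if_true]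
          simp
        · simp only [List.foldl_cons, stepA, if_neg h1, if_neg h2, if_neg h3]
          rw [ih]
          congr 1
          unfold segsFrom
          simp only [findCutB, if_neg h1, if_neg h2, if_neg h3]
          rcases hx : findCutB cs d with ⟨seg, _ | r⟩ <;> simp [hx]

theorem splitTopA_eq (cs : List Char) : splitTopA cs = splitSegsB cs := by
  show ((cs.foldl stepA ([], [], 0)).1 ++
      [PySem.Chars.strip (cs.foldl stepA ([], [], 0)).2.1]).filter (fun p => p ≠ []) = _
  rw [foldA_eq cs [] [] 0, ← segsB_unfold]
  simp [splitSegsB]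

theorem mem_segsB_strip (cs : List Char) :
    ∀ x ∈ segsB cs, PySem.Chars.strip x = x := by
  induction cs using segsB.induct with
  | case1 cs seg h =>
    intro x hx
    rw [segsB_unfold] at hx
    simp only [segsFrom, h] at hx
    simp at hx
    subst hx
    simpa using strip_idem seg
  | case2 cs seg r h ih =>
    intro x hx
    rw [segsB_unfold] at hx
    simp only [segsFrom, h] at hx
    simp at hx
    rcases hx with rfl | hx
    · simpa using strip_idem seg
    · exact ih x hx

theorem mem_splitSegsB (cs x : List Char) (hx : x ∈ splitSegsB cs) :
    PySem.Chars.strip x = x ∧ x ≠ [] := by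
  unfold splitSegsB at hx
  rw [List.mem_filter] at hx
  exact ⟨mem_segsB_strip cs x hx.1, by simpa using hx.2⟩

-- ===== VERDICT (by name: the statement is the Claim_ definition above) =====
theorem parse_primary_key_py_spec : Claim_equal_parse_primary_key_py := by
  intro pk _
  unfold Spec_parse_primary_key_py parse_primary_key_py parse_primary_key_py_alt
  simp only [splitTopA_eq]
  cases hC : splitSegsB
      (if PySem.Chars.startswith (PySem.Chars.strip pk.toList) ['('] &&
          PySem.Chars.endswith (PySem.Chars.strip pk.toList) [')'] then
        PySem.Chars.strip (PySem.List.slice (PySem.Chars.strip pk.toList) (some 1) (some (-1)))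
      else PySem.Chars.strip pk.toList) with
  | nil => simp [hC]
  | cons first rest =>
    simp only [hC]
    have hfirst := mem_splitSegsB _ first (by rw [hC]; exact List.mem_cons_self)
    have hrest : ∀ x ∈ rest, PySem.Chars.strip x = x := fun x hx =>
      (mem_splitSegsB _ x (by rw [hC]; exact List.mem_cons_of_mem _ hx)).1
    have hcl : rest.map PySem.Chars.strip = rest := by
      rw [List.map_congr_left hrest]; simp
    by_cases hw : PySem.Chars.startswith first ['('] && PySem.Chars.endswith first [')']
    · simp only [hw, if_true]
      set in2 := PySem.Chars.strip (PySem.List.slice first (some 1) (some (-1))) with hin2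
      have hfil : (splitSegsB in2).filter (fun p => PySem.Chars.strip p ≠ []) = splitSegsB in2 := by
        apply List.filter_eq_self.mpr
        intro x hx
        have := mem_splitSegsB in2 x hx
        simp [this.1, this.2]
      have hmap : (splitSegsB in2).map PySem.Chars.strip = splitSegsB in2 := by
        rw [List.map_congr_left (fun x hx => (mem_splitSegsB in2 x hx).1)]; simp
      rw [hfil, hmap, hcl]
    · simp only [hw, if_false, Bool.false_eq_true]
      rw [hfirst.1, hcl]
      simp
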